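-- pv_equiv track=rewrite | github.com/vajwanigithud/DocSort | docsort/tools/cleanup_split_archive.py | _build_coverage
-- ===== SOURCE A (Python) =====
-- from typing import Dict, Iterable, List, Optional, Set, Tuple
--
-- def _build_coverage(total_pages: int, ranges: List[Tuple[int, int]]) -> Tuple[Set[int], bool]:
--     coverage: Set[int] = set()
--     overlap = False
--     for start, end in ranges:
--         for page in range(start, end + 1):
--             if page in coverage:
--                 overlap = True
--             coverage.add(page)
--     return coverage, overlap
-- ===== SOURCE B (Python) =====
-- from typing import Dict, Iterable, List, Optional, Set, Tuple
--
-- def _build_coverage(total_pages: int, ranges: List[Tuple[int, int]]) -> Tuple[Set[int], bool]: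
--     coverage: Set[int] = set().union(*(range(start, end + 1) for start, end in ranges))
--     overlap = False
--     seen: List[Tuple[int, int]] = []
--     for start, end in ranges:
--         if start <= end:
--             if any(start <= e and s <= end for s, e in seen):
--                 overlap = True
--             seen.append((start, end))
--     return coverage, overlap
-- ===== Notes on version B (the rewrite author's own statement) =====
-- stated objective: alternative
-- what changed: B detects overlap by interval arithmetic instead of per-page membership: it keeps the non-empty intervals seen so far and tests each new interval for intersection (start <= e and s <= end) against them, never asking whether a page is already covered; the coverage set itself is built separately as one union of all ranges.
import Mathlib
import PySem

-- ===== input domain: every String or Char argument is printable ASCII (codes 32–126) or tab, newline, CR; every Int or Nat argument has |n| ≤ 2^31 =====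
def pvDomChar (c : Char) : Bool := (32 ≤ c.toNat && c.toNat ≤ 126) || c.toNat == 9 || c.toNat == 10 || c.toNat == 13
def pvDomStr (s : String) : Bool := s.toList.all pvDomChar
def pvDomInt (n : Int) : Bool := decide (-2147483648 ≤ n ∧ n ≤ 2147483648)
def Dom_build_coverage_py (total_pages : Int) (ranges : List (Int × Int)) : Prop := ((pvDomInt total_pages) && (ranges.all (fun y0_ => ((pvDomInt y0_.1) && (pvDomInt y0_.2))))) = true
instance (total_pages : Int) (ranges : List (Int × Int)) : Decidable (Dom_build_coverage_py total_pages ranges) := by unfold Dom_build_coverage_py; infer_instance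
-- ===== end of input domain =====

-- B detects overlap by interval-intersection tests against the non-empty intervals
-- seen so far instead of per-page membership tests; the coverage set is built
-- separately as one union of all ranges (objective: alternative algorithm, same result).

-- ===== PORT A =====
-- A: one pass over ranges; for every page of range(start, end+1), test membership
-- (setting the overlap flag) and add the page to the coverage set.
def build_coverage_py (total_pages : Int) (ranges : List (Int × Int)) : List Int × Bool :=
  ranges.foldl
    (fun (st : PySem.Set Int × Bool) r =>
      (PySem.List.pyRange r.1 (r.2 + 1) 1).foldl
        (fun st2 page => (PySem.Set.add st2.1 page, st2.2 || PySem.Set.contains st2.1 page))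
        st)
    (PySem.Set.empty, false)

-- ===== PORT B =====
-- B: coverage = set().union(*(range(s, e+1) for s, e in ranges)); then a loop over
-- ranges keeping 'seen' (the non-empty intervals so far) and setting overlap when the
-- current non-empty interval intersects one of them (start <= e and s <= end).
def build_coverage_py_alt (total_pages : Int) (ranges : List (Int × Int)) : List Int × Bool :=
  let coverage : PySem.Set Int :=
    ranges.foldl (fun s r => PySem.Set.update s (PySem.List.pyRange r.1 (r.2 + 1) 1)) PySem.Set.empty
  let st :=
    ranges.foldl
      (fun (st : Bool × List (Int × Int)) r =>
        if r.1 ≤ r.2 then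
          (st.1 || st.2.any (fun q => decide (r.1 ≤ q.2) && decide (q.1 ≤ r.2)), st.2 ++ [r])
        else st)
      (false, ([] : List (Int × Int)))
  (coverage, st.1)

-- ===== PRECONDITION & SPEC =====
def Spec_build_coverage_py (total_pages : Int) (ranges : List (Int × Int)) (out : List Int × Bool) : Prop := out = build_coverage_py_alt total_pages ranges
instance (total_pages : Int) (ranges : List (Int × Int)) (out : List Int × Bool) : Decidable (Spec_build_coverage_py total_pages ranges out) := by unfold Spec_build_coverage_py; infer_instance

-- ===== CLAIM =====
def Claim_equal_build_coverage_py : Prop := ∀ (total_pages : Int) (ranges : List (Int × Int)), Dom_build_coverage_py total_pages ranges → Spec_build_coverage_py total_pages ranges (build_coverage_py total_pages ranges)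

-- ===== LEMMAS AND PROOFS =====

-- A's inner loop over one duplicate-free page list: the set becomes Set.update and the
-- flag picks up "some page was already in the set".
theorem pv_inner (ps : List Int) (hnd : ps.Nodup) :
    ∀ (cov : PySem.Set Int) (ov : Bool),
      ps.foldl (fun st2 page => (PySem.Set.add st2.1 page, st2.2 || PySem.Set.contains st2.1 page)) (cov, ov)
        = (PySem.Set.update cov ps, ov || ps.any (fun p => PySem.Set.contains cov p)) := by
  induction ps with
  | nil => intro cov ov; simp [PySem.Set.update]
  | cons p ps ih =>
    intro cov ov
    obtain ⟨hp, hnd'⟩ := List.nodup_cons.mp hnd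
    rw [List.foldl_cons, ih hnd']
    have hany : ps.any (fun q => PySem.Set.contains (PySem.Set.add cov p) q)
        = ps.any (fun q => PySem.Set.contains cov q) := by
      rw [Bool.eq_iff_iff]
      simp only [List.any_eq_true, PySem.Set.contains_iff, PySem.Set.mem_add]
      constructor
      · rintro ⟨q, hq, h | h⟩
        · exact ⟨q, hq, h⟩
        · exact absurd (h ▸ hq) hp
      · rintro ⟨q, hq, h⟩; exact ⟨q, hq, Or.inl h⟩
    rw [hany]
    simp [PySem.Set.update_cons, Bool.or_assoc]

-- Main invariant: A's fold from (cov, ov) equals (the union fold, B's flag from (ov, seen)),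
-- whenever cov's members are exactly the pages of the non-empty intervals in seen.
theorem pv_main (rs : List (Int × Int)) :
    ∀ (cov : PySem.Set Int) (ov : Bool) (seen : List (Int × Int)),
      (∀ q ∈ seen, q.1 ≤ q.2) →
      (∀ p : Int, p ∈ cov ↔ ∃ q ∈ seen, q.1 ≤ p ∧ p ≤ q.2) →
      rs.foldl
          (fun (st : PySem.Set Int × Bool) r =>
            (PySem.List.pyRange r.1 (r.2 + 1) 1).foldl
              (fun st2 page => (PySem.Set.add st2.1 page, st2.2 || PySem.Set.contains st2.1 page)) st)
          (cov, ov)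
        = (rs.foldl (fun s r => PySem.Set.update s (PySem.List.pyRange r.1 (r.2 + 1) 1)) cov,
           (rs.foldl
              (fun (st : Bool × List (Int × Int)) r =>
                if r.1 ≤ r.2 then
                  (st.1 || st.2.any (fun q => decide (r.1 ≤ q.2) && decide (q.1 ≤ r.2)), st.2 ++ [r])
                else st)
              (ov, seen)).1) := by
  induction rs with
  | nil => intro cov ov seen _ _; rfl
  | cons r rs ih =>
    intro cov ov seen hne hinv
    rw [List.foldl_cons, pv_inner _ (PySem.List.nodup_pyRange_one _ _) cov ov, List.foldl_cons, List.foldl_cons]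
    by_cases hr : r.1 ≤ r.2
    · -- non-empty interval: the per-page test equals the interval-intersection test
      have hflag : (PySem.List.pyRange r.1 (r.2 + 1) 1).any (fun p => PySem.Set.contains cov p)
          = seen.any (fun q => decide (r.1 ≤ q.2) && decide (q.1 ≤ r.2)) := by
        rw [Bool.eq_iff_iff]
        simp only [List.any_eq_true, PySem.Set.contains_iff, PySem.List.mem_pyRange_one,
          Bool.and_eq_true, decide_eq_true_eq]
        constructor
        · rintro ⟨p, ⟨hp1, hp2⟩, hc⟩
          rw [hinv] at hc
          obtain ⟨q, hq, h1, h2⟩ := hc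
          exact ⟨q, hq, by omega, by omega⟩
        · rintro ⟨q, hq, h1, h2⟩
          have hq1 := hne q hq
          exact ⟨max r.1 q.1, ⟨by omega, by omega⟩,
            by rw [hinv]; exact ⟨q, hq, by omega, by omega⟩⟩
      rw [if_pos hr, hflag]
      apply ih
      · intro q hq
        rcases List.mem_append.mp hq with h | h
        · exact hne q h
        · simp at h; subst h; exact hr
      · intro p
        rw [PySem.Set.mem_update, hinv]
        constructor
        · rintro (⟨q, hq, h1, h2⟩ | hp)
          · exact ⟨q, List.mem_append_left _ hq, h1, h2⟩
          · rw [PySem.List.mem_pyRange_one] at hp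
            exact ⟨r, List.mem_append_right _ (List.mem_singleton.mpr rfl), hp.1, by omega⟩
        · rintro ⟨q, hq, h1, h2⟩
          rcases List.mem_append.mp hq with h | h
          · exact Or.inl ⟨q, h, h1, h2⟩
          · simp at h; subst h
            exact Or.inr (PySem.List.mem_pyRange_one.mpr ⟨h1, by omega⟩)
    · -- empty interval: both sides skip it
      have hnil : PySem.List.pyRange r.1 (r.2 + 1) 1 = [] :=
        PySem.List.pyRange_one_eq_nil (by omega)
      rw [if_neg hr, hnil]
      simpa [PySem.Set.update] using ih cov ov seen hne hinv

-- ===== VERDICT =====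
theorem build_coverage_py_spec : Claim_equal_build_coverage_py := by
  intro total_pages ranges _
  unfold Spec_build_coverage_py build_coverage_py build_coverage_py_alt
  exact pv_main ranges PySem.Set.empty false [] (by simp)
    (by intro p; simp [PySem.Set.empty])
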